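-- pv_equiv track=rewrite | github.com/jul178/python-academic-projects | aliens_and_iq/rescue.py | rescue_people
-- ===== SOURCE A (Python) =====
-- def rescue_people(smarties, limit_iq):
--     """Plan evacuation trips for smart people given an IQ limit per trip.
--
--     Args:
--         smarties(dict): Result of read_file(). Dictionary where the key is name
--                         of the smartest people and the value is their IQ level.
--         limit_iq(int): The maximum total IQ level of people who can be on board.
--
--     Returns:
--         tuple[int, list]: A tuple where first element is the number of needed journeys
--                             and the second elements is the list of lists of journey
--                             and include names of smart people that are transporting
--                             in the order of aliens choise.
--     >>> rescue_people({"Steve Jobs": 160, "Albert Einstein": 160, "Sir Isaac Newton": 195,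
--     ...                 "Nikola Tesla": 189}, 500)
--     (2, [['Sir Isaac Newton', 'Nikola Tesla'], ['Albert Einstein', 'Steve Jobs']])
--     """
--     sorted_smarties = sorted(smarties.items(), key=lambda x: (-x[1], x[0]))
--
--     journeys = []
--     while sorted_smarties:
--         name, iq = sorted_smarties.pop(0)
--         rest = limit_iq - iq
--         journey = [name]
--         next_journey = []
--         for name, iq in sorted_smarties:
--             if iq <= rest:
--                 journey.append(name)
--                 rest -= iq
--             else:
--                 next_journey.append((name, iq))
--         sorted_smarties = next_journey
--         journeys.append(journey)
--
--     return (len(journeys), journeys)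
-- ===== SOURCE B (Python) =====
-- def rescue_people(smarties, limit_iq):
--     """Single-pass first-fit over the sorted people, keeping per-journey budgets."""
--     journeys = []  # each entry: [names, remaining_budget]
--     for name, iq in sorted(smarties.items(), key=lambda x: (-x[1], x[0])):
--         for j in journeys:
--             if iq <= j[1]:
--                 j[0].append(name)
--                 j[1] -= iq
--                 break
--         else:
--             journeys.append([[name], limit_iq - iq])
--     return (len(journeys), [j[0] for j in journeys])
-- ===== Notes on version B (the rewrite author's own statement) =====
-- stated objective: alternative
-- what changed: Replaced A's multi-pass rebuild-the-remainder loop (each outer iteration scans all leftover people and rebuilds the leftover list) with a single first-fit pass over the sorted people that maintains per-journey remaining budgets.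
import Mathlib
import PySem

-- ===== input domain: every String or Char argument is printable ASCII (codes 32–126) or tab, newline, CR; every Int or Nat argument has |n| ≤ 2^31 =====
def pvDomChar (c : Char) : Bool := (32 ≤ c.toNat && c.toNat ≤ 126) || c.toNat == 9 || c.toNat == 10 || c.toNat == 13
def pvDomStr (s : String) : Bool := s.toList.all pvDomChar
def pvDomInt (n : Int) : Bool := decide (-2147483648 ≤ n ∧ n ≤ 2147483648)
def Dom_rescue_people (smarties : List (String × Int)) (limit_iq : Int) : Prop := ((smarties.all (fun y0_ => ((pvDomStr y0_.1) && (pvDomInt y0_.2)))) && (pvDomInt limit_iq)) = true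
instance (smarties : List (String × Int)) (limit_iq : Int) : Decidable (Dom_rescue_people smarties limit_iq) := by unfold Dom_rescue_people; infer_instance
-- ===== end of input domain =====

-- B replaces A's multi-pass rebuild-the-remainder loop with one first-fit pass over
-- bins carrying remaining budgets (alternative decomposition, same asymptotic cost).


-- ===== PORT A =====
-- A's inner for-loop over the remaining people: state = (rest, journey, next_journey)
def pvStep (st : Int × List String × List (String × Int)) (p : String × Int) :
    Int × List String × List (String × Int) :=
  if p.2 ≤ st.1 then (st.1 - p.2, st.2.1 ++ [p.1], st.2.2)
  else (st.1, st.2.1, st.2.2 ++ [p])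

def pvPass (rest : Int) (xs : List (String × Int)) :
    Int × List String × List (String × Int) :=
  xs.foldl pvStep (rest, [], [])

-- termination fact for A's while-loop: the rebuilt remainder is no longer than the input
theorem pvPass_len_le (rest : Int) (xs : List (String × Int)) :
    (pvPass rest xs).2.2.length ≤ xs.length := by
  suffices h : ∀ (xs : List (String × Int)) (st : Int × List String × List (String × Int)),
      (xs.foldl pvStep st).2.2.length ≤ st.2.2.length + xs.length by
    simpa [pvPass] using h xs (rest, [], [])
  intro xs
  induction xs with
  | nil => intro st; simp
  | cons p t ih =>
    intro st
    have := ih (pvStep st p)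
    simp only [List.foldl_cons]
    refine this.trans ?_
    unfold pvStep
    split <;> simp <;> omega

-- A's while-loop over the sorted (and repeatedly rebuilt) list
def pvLoopA (limit_iq : Int) : List (String × Int) → List (List String)
  | [] => []
  | (name, iq) :: t =>
    let r := pvPass (limit_iq - iq) t
    ([name] ++ r.2.1) :: pvLoopA limit_iq r.2.2
termination_by xs => xs.length
decreasing_by
  have := pvPass_len_le (limit_iq - iq) t
  simp only [List.length_cons]
  omega

def rescue_people (smarties : List (String × Int)) (limit_iq : Int) : Int × List (List String) :=
  let sorted_smarties :=
    PySem.List.sorted2 (PySem.Dict.ofList smarties).items (fun x => -x.2) (fun x => x.1)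
  let journeys := pvLoopA limit_iq sorted_smarties
  ((journeys.length : Int), journeys)

-- ===== PORT B =====
-- first-fit placement of one person into the list of (names, remaining_budget) journeys
def pvPlace (limit_iq : Int) : List (List String × Int) → String × Int → List (List String × Int)
  | [], p => [([p.1], limit_iq - p.2)]
  | j :: rest, p =>
    if p.2 ≤ j.2 then (j.1 ++ [p.1], j.2 - p.2) :: rest
    else j :: pvPlace limit_iq rest p

def rescue_people_alt (smarties : List (String × Int)) (limit_iq : Int) : Int × List (List String) :=
  let sorted_smarties :=
    PySem.List.sorted2 (PySem.Dict.ofList smarties).items (fun x => -x.2) (fun x => x.1)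
  let journeys := sorted_smarties.foldl (pvPlace limit_iq) []
  ((journeys.length : Int), journeys.map (·.1))

-- ===== PRECONDITION & SPEC =====
def Spec_rescue_people (smarties : List (String × Int)) (limit_iq : Int) (out : Int × List (List String)) : Prop := out = rescue_people_alt smarties limit_iq
instance (smarties : List (String × Int)) (limit_iq : Int) (out : Int × List (List String)) : Decidable (Spec_rescue_people smarties limit_iq out) := by unfold Spec_rescue_people; infer_instance

-- ===== CLAIM (what is proved, stated in full; the proofs are below) =====
def Claim_equal_rescue_people : Prop := ∀ (smarties : List (String × Int)) (limit_iq : Int), Dom_rescue_people smarties limit_iq → Spec_rescue_people smarties limit_iq (rescue_people smarties limit_iq)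

-- ===== LEMMAS AND PROOFS =====

-- pvPass with an arbitrary accumulator state
theorem pvPass_acc (xs : List (String × Int)) (r : Int) (j0 : List String)
    (nx0 : List (String × Int)) :
    xs.foldl pvStep (r, j0, nx0) =
      ((pvPass r xs).1, j0 ++ (pvPass r xs).2.1, nx0 ++ (pvPass r xs).2.2) := by
  induction xs generalizing r j0 nx0 with
  | nil => simp [pvPass]
  | cons p t ih =>
    simp only [pvPass, List.foldl_cons, pvStep]
    simp only [List.nil_append]
    split
    · rw [ih, ih (r - p.2) [p.1] []]; simp
    · rw [ih, ih r [] [p]]; simp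

-- KEY: first-fit into a head bin (ns, b) followed by J equals A's single pass with
-- budget b filling that bin and sending the remainder on to the bins J.
theorem pvFirstFit_pass (lim : Int) (xs : List (String × Int)) (ns : List String)
    (b : Int) (J : List (List String × Int)) :
    xs.foldl (pvPlace lim) ((ns, b) :: J) =
      (ns ++ (pvPass b xs).2.1, (pvPass b xs).1) ::
        (pvPass b xs).2.2.foldl (pvPlace lim) J := by
  induction xs generalizing ns b J with
  | nil => simp [pvPass]
  | cons p t ih =>
    simp only [List.foldl_cons, pvPlace]
    have hp : pvPass b (p :: t) = (p :: t).foldl pvStep (b, [], []) := rfl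
    rw [hp]
    simp only [List.foldl_cons, pvStep, List.nil_append]
    split
    · rw [ih, pvPass_acc t (b - p.2) [p.1] []]
      simp
    · rw [ih, pvPass_acc t b [] [p]]
      simp

-- first-fit over the whole list produces exactly A's journeys (with budgets attached)
theorem pvFold_eq_loopA (lim : Int) (xs : List (String × Int)) :
    (xs.foldl (pvPlace lim) []).map (·.1) = pvLoopA lim xs := by
  induction xs using pvLoopA.induct lim with
  | case1 => simp [pvLoopA]
  | case2 name iq t r ih =>
    simp only [List.foldl_cons, pvPlace, pvLoopA]
    rw [pvFirstFit_pass lim t [name] (lim - iq) []]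
    simp only [List.map_cons, List.singleton_append]
    exact congrArg _ ih

-- ===== VERDICT (by name: the statement is the Claim_ definition above) =====
theorem rescue_people_spec : Claim_equal_rescue_people := by
  intro smarties limit_iq _
  unfold Spec_rescue_people rescue_people rescue_people_alt
  have h := pvFold_eq_loopA limit_iq
    (PySem.List.sorted2 (PySem.Dict.ofList smarties).items (fun x => -x.2) (fun x => x.1))
  refine Prod.ext ?_ h.symm
  simp only []
  rw [← h, List.length_map]
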